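-- pv_equiv track=rewrite | github.com/basilkensington1-hash/kiin-content | src/repurpose.py | extract_key_quote
-- ===== SOURCE A (Python) =====
-- def extract_key_quote(transcript: str) -> str:
--     """Extract a key quote from transcript."""
--     sentences = [s.strip() for s in transcript.split('.') if s.strip()]
--
--     # Simple heuristic: find shorter, impactful sentences
--     candidates = []
--     for sentence in sentences:
--         word_count = len(sentence.split())
--         if 5 <= word_count <= 20:  # Good quote length
--             # Prefer sentences with emotional or action words
--             power_words = ['transform', 'change', 'growth', 'journey', 'discover',
--                          'overcome', 'strength', 'heal', 'empowered', 'breakthrough']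
--
--             score = sum(1 for word in power_words if word.lower() in sentence.lower())
--             candidates.append((sentence, score, word_count))
--
--     if candidates:
--         # Sort by score, then by length (shorter preferred)
--         candidates.sort(key=lambda x: (-x[1], x[2]))
--         return candidates[0][0]
--
--     # Fallback: return first sentence if no good candidates
--     return sentences[0] if sentences else "Transform your mindset"
-- ===== SOURCE B (Python) =====
-- def extract_key_quote(transcript: str) -> str:
--     """Extract a key quote from transcript (single pass, no candidate list, no sort)."""
--     power_words = ['transform', 'change', 'growth', 'journey', 'discover',
--                    'overcome', 'strength', 'heal', 'empowered', 'breakthrough']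
--     first = None
--     best = None  # (sentence, score, word_count)
--     for part in transcript.split('.'):
--         s = part.strip()
--         if not s:
--             continue
--         if first is None:
--             first = s
--         wc = len(s.split())
--         if 5 <= wc <= 20:
--             low = s.lower()
--             score = sum(1 for w in power_words if w in low)
--             if best is None or score > best[1] or (score == best[1] and wc < best[2]):
--                 best = (s, score, wc)
--     if best is not None:
--         return best[0]
--     return first if first is not None else "Transform your mindset"
-- ===== Notes on version B (the rewrite author's own statement) =====
-- stated objective: simpler
-- what changed: Replaced build-candidate-list-then-stable-sort-and-take-head by a single linear pass that tracks the running best (strict improvement on (score desc, word_count asc) keeps the earliest, matching the stable sort), lowercasing each sentence once and never lowercasing the already-lowercase power words.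
import Mathlib
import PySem

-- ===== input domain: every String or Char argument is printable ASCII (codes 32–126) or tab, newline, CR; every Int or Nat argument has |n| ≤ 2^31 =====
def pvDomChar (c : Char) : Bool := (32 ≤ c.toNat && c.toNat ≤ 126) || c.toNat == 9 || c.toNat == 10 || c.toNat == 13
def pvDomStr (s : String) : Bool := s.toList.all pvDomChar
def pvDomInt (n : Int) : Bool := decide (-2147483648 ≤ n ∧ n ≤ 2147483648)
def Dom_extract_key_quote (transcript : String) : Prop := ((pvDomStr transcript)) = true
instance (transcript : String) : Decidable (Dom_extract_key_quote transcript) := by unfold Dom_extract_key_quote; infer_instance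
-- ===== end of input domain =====

-- B replaces A's candidate-list + stable sort by one linear pass that keeps a running best
-- under a strict-improvement rule (objective: simpler).
-- sep "." is a nonempty literal, so Str.split? below is always `some`; `.getD []` just unwraps it.

-- ===== PORT A =====
def pvPowerWords : List String :=
  ["transform", "change", "growth", "journey", "discover",
   "overcome", "strength", "heal", "empowered", "breakthrough"]

-- the body of A's `for sentence in sentences` loop
def pvStepA (acc : List (String × Int × Int)) (sentence : String) : List (String × Int × Int) :=
  let word_count : Int := (PySem.Str.split₀ sentence).length
  if 5 ≤ word_count ∧ word_count ≤ 20 then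
    -- score = sum(1 for word in power_words if word.lower() in sentence.lower())
    let score : Int :=
      (pvPowerWords.countP
        (fun word => PySem.Str.isIn (PySem.Str.lower word) (PySem.Str.lower sentence)) : Int)
    acc ++ [(sentence, score, word_count)]
  else acc

def extract_key_quote (transcript : String) : String :=
  let sentences : List String :=
    (((PySem.Str.split? transcript ".").getD []).map PySem.Str.strip).filter (fun s => s ≠ "")
  let candidates : List (String × Int × Int) := sentences.foldl pvStepA []
  if candidates ≠ [] then
    ((PySem.List.sorted2 candidates (fun x => -x.2.1) (fun x => x.2.2)).headD ("", 0, 0)).1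
  else
    sentences.headD "Transform your mindset"

-- ===== PORT B =====
-- the body of B's `for part in transcript.split('.')` loop; state = (first, best)
def pvStepB (st : Option String × Option (String × Int × Int)) (part : String) :
    Option String × Option (String × Int × Int) :=
  let s := PySem.Str.strip part
  if s = "" then st
  else
    let first := if st.1.isNone then some s else st.1
    let wc : Int := (PySem.Str.split₀ s).length
    let best :=
      if 5 ≤ wc ∧ wc ≤ 20 then
        let low := PySem.Str.lower s
        let score : Int := (pvPowerWords.countP (fun w => PySem.Str.isIn w low) : Int)
        match st.2 with
        | none => some (s, score, wc)
        | some b =>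
          if b.2.1 < score ∨ (score = b.2.1 ∧ wc < b.2.2) then some (s, score, wc)
          else some b
      else st.2
    (first, best)

def extract_key_quote_alt (transcript : String) : String :=
  let st := ((PySem.Str.split? transcript ".").getD []).foldl pvStepB (none, none)
  match st.2 with
  | some b => b.1
  | none =>
    match st.1 with
    | some f => f
    | none => "Transform your mindset"

-- ===== PRECONDITION & SPEC =====
def Spec_extract_key_quote (transcript : String) (out : String) : Prop := out = extract_key_quote_alt transcript
instance (transcript : String) (out : String) : Decidable (Spec_extract_key_quote transcript out) := by unfold Spec_extract_key_quote; infer_instance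

-- ===== CLAIM (what is proved, stated in full; the proofs are below) =====
def Claim_equal_extract_key_quote : Prop := ∀ (transcript : String), Dom_extract_key_quote transcript → Spec_extract_key_quote transcript (extract_key_quote transcript)

-- ===== LEMMAS AND PROOFS =====

-- proof-only helpers: a common characterisation of both programs
def pvWc (s : String) : Int := ((PySem.Str.split₀ s).length : Int)
def pvScore (s : String) : Int := (pvPowerWords.countP (fun w => PySem.Str.isIn w (PySem.Str.lower s)) : Int)
def pvCand (s : String) : String × Int × Int := (s, pvScore s, pvWc s)
def pvGood (s : String) : Bool := decide (5 ≤ pvWc s ∧ pvWc s ≤ 20)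
def pvBefore (c b : String × Int × Int) : Bool :=
  decide (-c.2.1 < -b.2.1) || (!decide (-b.2.1 < -c.2.1) && decide (c.2.2 < b.2.2))
def pvSents (t : String) : List String :=
  (((PySem.Str.split? t ".").getD []).map PySem.Str.strip).filter (fun s => s ≠ "")
def pvCands (t : String) : List (String × Int × Int) := ((pvSents t).filter pvGood).map pvCand
def pvBest (c : String × Int × Int) (cs : List (String × Int × Int)) : String × Int × Int :=
  cs.foldl (fun b x => if pvBefore x b then x else b) c
def pvResult (t : String) : String :=
  match pvCands t with
  | c :: cs => (pvBest c cs).1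
  | [] => (pvSents t).headD "Transform your mindset"

-- the power words are already lowercase
lemma pv_lower_power : ∀ w ∈ pvPowerWords, PySem.Str.lower w = w := by
  intro w hw
  simp only [pvPowerWords, List.mem_cons, List.not_mem_nil, or_false] at hw
  rcases hw with h | h | h | h | h | h | h | h | h | h <;> subst h <;> rfl

lemma pv_stepA_eq (acc : List (String × Int × Int)) (s : String) :
    pvStepA acc s = if pvGood s then acc ++ [pvCand s] else acc := by
  simp only [pvStepA, pvGood, pvCand, pvScore, pvWc]
  have hsc : (pvPowerWords.countP
      (fun word => PySem.Str.isIn (PySem.Str.lower word) (PySem.Str.lower s)))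
      = pvPowerWords.countP (fun w => PySem.Str.isIn w (PySem.Str.lower s)) :=
    List.countP_congr (fun w hw => by rw [pv_lower_power w hw])
  rw [hsc]
  by_cases h : 5 ≤ ((PySem.Str.split₀ s).length : Int) ∧ ((PySem.Str.split₀ s).length : Int) ≤ 20 <;>
    simp [h]

lemma pv_cands_foldl : ∀ (l : List String) (acc : List (String × Int × Int)),
    l.foldl pvStepA acc = acc ++ (l.filter pvGood).map pvCand := by
  intro l
  induction l with
  | nil => simp
  | cons s l ih =>
    intro acc
    rw [List.foldl_cons, pv_stepA_eq, List.filter_cons]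
    by_cases h : pvGood s <;> simp [h, ih]

lemma pv_insertBy_cons {α : Type} (before : α → α → Bool) (x y : α) (ys : List α) :
    PySem.List.insertBy before x (y :: ys) =
      if before x y then x :: y :: ys else y :: PySem.List.insertBy before x ys := by
  simp [PySem.List.insertBy]

lemma pv_head_insert_fold {α : Type} (before : α → α → Bool) (d : α) :
    ∀ (cs : List α) (y : α) (ys : List α),
      ((cs.foldl (fun acc x => PySem.List.insertBy before x acc) (y :: ys)).headD d)
        = cs.foldl (fun b x => if before x b then x else b) y := by
  intro cs
  induction cs with
  | nil => intro y ys; rfl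
  | cons c cs ih =>
    intro y ys
    rw [List.foldl_cons, List.foldl_cons, pv_insertBy_cons]
    by_cases h : before c y <;> simp only [h, Bool.false_eq_true, if_true, if_false] <;>
      exact ih _ _

lemma pv_sorted2_head (c : String × Int × Int) (cs : List (String × Int × Int)) :
    (PySem.List.sorted2 (c :: cs) (fun x => -x.2.1) (fun x => x.2.2)).headD ("", 0, 0)
      = pvBest c cs := by
  show ((cs.foldl (fun acc x => PySem.List.insertBy pvBefore x acc) [c]).headD ("", 0, 0)) = _
  exact pv_head_insert_fold pvBefore ("", 0, 0) cs c []

-- A equals the common characterisation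
lemma pv_A_eq (t : String) : extract_key_quote t = pvResult t := by
  show (if (pvSents t).foldl pvStepA [] ≠ [] then
      ((PySem.List.sorted2 ((pvSents t).foldl pvStepA []) (fun x => -x.2.1) (fun x => x.2.2)).headD ("", 0, 0)).1
    else (pvSents t).headD "Transform your mindset") = pvResult t
  rw [pv_cands_foldl (pvSents t) [], List.nil_append]
  show (if pvCands t ≠ [] then
      ((PySem.List.sorted2 (pvCands t) (fun x => -x.2.1) (fun x => x.2.2)).headD ("", 0, 0)).1
    else (pvSents t).headD "Transform your mindset") = pvResult t
  unfold pvResult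
  cases h : pvCands t with
  | nil => simp
  | cons c cs =>
    rw [if_pos (by exact List.cons_ne_nil c cs), pv_sorted2_head]

-- B-side: the strict-improvement update
def pvUpd (b : Option (String × Int × Int)) (c : String × Int × Int) : Option (String × Int × Int) :=
  match b with
  | none => some c
  | some b => if b.2.1 < c.2.1 ∨ (c.2.1 = b.2.1 ∧ c.2.2 < b.2.2) then some c else some b

lemma pv_before_eq (c b : String × Int × Int) :
    pvBefore c b = decide (b.2.1 < c.2.1 ∨ (c.2.1 = b.2.1 ∧ c.2.2 < b.2.2)) := by
  simp only [pvBefore]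
  by_cases h1 : b.2.1 < c.2.1 <;> by_cases h2 : c.2.1 = b.2.1 <;> by_cases h3 : c.2.2 < b.2.2 <;>
    simp [h1, h2, h3] <;> omega

lemma pv_upd_some : ∀ (cs : List (String × Int × Int)) (b : String × Int × Int),
    cs.foldl pvUpd (some b) = some (pvBest b cs) := by
  intro cs
  induction cs with
  | nil => intro b; rfl
  | cons c cs ih =>
    intro b
    rw [List.foldl_cons,
      show pvBest b (c :: cs) = pvBest (if pvBefore c b then c else b) cs from rfl,
      pv_before_eq,
      show pvUpd (some b) c
        = if b.2.1 < c.2.1 ∨ (c.2.1 = b.2.1 ∧ c.2.2 < b.2.2) then some c else some b from rfl]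
    by_cases hp : b.2.1 < c.2.1 ∨ (c.2.1 = b.2.1 ∧ c.2.2 < b.2.2) <;> simp [hp, ih]

-- B's single fold, split into its two independent components
def pvStepFirst (o : Option String) (s : String) : Option String := if o.isNone then some s else o
def pvStepBest (o : Option (String × Int × Int)) (s : String) : Option (String × Int × Int) :=
  if 5 ≤ pvWc s ∧ pvWc s ≤ 20 then pvUpd o (pvCand s) else o

lemma pv_stepB_ne (st : Option String × Option (String × Int × Int)) (part : String)
    (h : PySem.Str.strip part ≠ "") :
    pvStepB st part = (pvStepFirst st.1 (PySem.Str.strip part), pvStepBest st.2 (PySem.Str.strip part)) := by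
  simp only [pvStepB, pvStepFirst, pvStepBest, pvUpd, pvCand, pvScore, pvWc, h]
  cases st.2 <;> rfl

lemma pv_B_fold : ∀ (ps : List String) (st : Option String × Option (String × Int × Int)),
    ps.foldl pvStepB st
    = (((ps.map PySem.Str.strip).filter (fun s => s ≠ "")).foldl pvStepFirst st.1,
       ((ps.map PySem.Str.strip).filter (fun s => s ≠ "")).foldl pvStepBest st.2) := by
  intro ps
  induction ps with
  | nil => intro st; rfl
  | cons p ps ih =>
    intro st
    rw [List.foldl_cons, List.map_cons, List.filter_cons]
    by_cases h : PySem.Str.strip p = ""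
    · have hstep : pvStepB st p = st := by simp [pvStepB, h]
      simp only [h, ne_eq, not_true_eq_false, decide_false, hstep]
      exact ih st
    · simp only [h, ne_eq, not_false_eq_true, decide_true, if_true, List.foldl_cons]
      rw [ih, pv_stepB_ne st p h]

lemma pv_first_some : ∀ (l : List String) (x : String),
    l.foldl pvStepFirst (some x) = some x := by
  intro l
  induction l with
  | nil => intro x; rfl
  | cons y l ih => intro x; rw [List.foldl_cons]; exact ih x

lemma pv_first_none (l : List String) : l.foldl pvStepFirst none = l.head? := by
  cases l with
  | nil => rfl
  | cons x l => rw [List.foldl_cons]; exact pv_first_some l x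

lemma pv_best_fold : ∀ (l : List String) (o : Option (String × Int × Int)),
    l.foldl pvStepBest o = ((l.filter pvGood).map pvCand).foldl pvUpd o := by
  intro l
  induction l with
  | nil => intro o; rfl
  | cons s l ih =>
    intro o
    rw [List.foldl_cons, List.filter_cons]
    by_cases h : 5 ≤ pvWc s ∧ pvWc s ≤ 20
    · have : pvGood s = true := by simp [pvGood, h]
      simp only [this, List.map_cons, List.foldl_cons, pvStepBest, h, if_pos]
      exact ih _
    · have : pvGood s = false := by simp [pvGood, h]
      simp only [this, Bool.false_eq_true, if_false, pvStepBest, h]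
      exact ih o

-- B equals the common characterisation
lemma pv_B_eq (t : String) : extract_key_quote_alt t = pvResult t := by
  show (match (((PySem.Str.split? t ".").getD []).foldl pvStepB (none, none)).2 with
    | some b => b.1
    | none =>
      match (((PySem.Str.split? t ".").getD []).foldl pvStepB (none, none)).1 with
      | some f => f
      | none => "Transform your mindset") = pvResult t
  rw [pv_B_fold]
  show (match ((pvSents t).foldl pvStepBest none) with
    | some b => b.1
    | none =>
      match ((pvSents t).foldl pvStepFirst none) with
      | some f => f
      | none => "Transform your mindset") = pvResult t
  rw [pv_best_fold, pv_first_none]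
  unfold pvResult
  rw [show ((pvSents t).filter pvGood).map pvCand = pvCands t from rfl]
  cases h : pvCands t with
  | nil =>
    simp only [List.foldl_nil]
    cases hl : pvSents t with
    | nil => rfl
    | cons a l => rfl
  | cons c cs =>
    rw [List.foldl_cons, show pvUpd none c = some c from rfl, pv_upd_some]

-- ===== VERDICT (by name: the statement is the Claim_ definition above) =====
theorem extract_key_quote_spec : Claim_equal_extract_key_quote := by
  intro t _
  unfold Spec_extract_key_quote
  rw [pv_A_eq, pv_B_eq]
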